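-- pv_equiv track=rewrite | github.com/cryptboys/luna-polymarket-bot | src/news.py | _filter_relevant
-- ===== SOURCE A (Python) =====
-- from typing import Dict, List, Optional
--
-- CATEGORY_KEYWORDS = {
--     'crypto': ['crypto', 'bitcoin', 'btc', 'ethereum', 'eth', 'defi', 'solana', 'coin'],
--     'politics': ['election', 'vote', 'congress', 'senate', 'policy', 'law', 'government', 'party'],
--     'sports': ['game', 'team', 'player', 'match', 'win', 'cup', 'league', 'finals'],
--     'business': ['market', 'stock', 'economy', 'gdp', 'fed', 'rate', 'inflation', 'corp'],
--     'science': ['study', 'research', 'discovery', 'health', 'space', 'science', 'tech'],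
-- }
--
-- def _filter_relevant(headlines: List[str], market_name: str, category: str) -> List[str]:
--     """Keep only headlines that mention market keywords"""
--     relevant = []
--
--     # Get category keywords
--     keywords = set(CATEGORY_KEYWORDS.get(category, []))
--
--     # Add words from market name (e.g. "Trump wins" -> "trump")
--     market_words = set(market_name.split())
--     keywords.update(market_words)
--
--     # Remove short words
--     keywords = {w for w in keywords if len(w) > 3}
--
--     for text in headlines:
--         text_lower = text.lower()
--         # Check if any keyword appears
--         if any(kw in text_lower for kw in keywords):
--             relevant.append(text_lower)
--
--     return relevant
-- ===== SOURCE B (Python) =====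
-- from typing import Dict, List, Optional
--
-- CATEGORY_KEYWORDS = {
--     'crypto': ['crypto', 'bitcoin', 'btc', 'ethereum', 'eth', 'defi', 'solana', 'coin'],
--     'politics': ['election', 'vote', 'congress', 'senate', 'policy', 'law', 'government', 'party'],
--     'sports': ['game', 'team', 'player', 'match', 'win', 'cup', 'league', 'finals'],
--     'business': ['market', 'stock', 'economy', 'gdp', 'fed', 'rate', 'inflation', 'corp'],
--     'science': ['study', 'research', 'discovery', 'health', 'space', 'science', 'tech'],
-- }
--
-- def _filter_relevant(headlines: List[str], market_name: str, category: str) -> List[str]: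
--     """Keep only headlines that mention market keywords.
--
--     No per-keyword substring loop: build a first-character index of the long
--     (len > 3) keywords, then scan each lowered headline position by position,
--     testing with startswith only the keywords whose first character matches.
--     Correct because a non-empty keyword occurs as a substring iff it starts at
--     some position, and an occurrence at i begins with character text[i];
--     duplicate index entries cannot change the boolean outcome.
--     """
--     by_first = {}
--     for kw in CATEGORY_KEYWORDS.get(category, []) + market_name.split():
--         if len(kw) > 3:
--             by_first.setdefault(kw[0], []).append(kw)
--
--     def hit(t):
--         for i in range(len(t)):
--             for kw in by_first.get(t[i], ()):
--                 if t.startswith(kw, i):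
--                     return True
--         return False
--
--     return [t for t in map(str.lower, headlines) if hit(t)]
-- ===== Notes on version B (the rewrite author's own statement) =====
-- stated objective: alternative
-- what changed: Replaces the per-keyword substring test ('kw in text_lower' for every keyword) by a first-character index of the keywords plus a position-major scan of each lowered headline: at each position only keywords whose first character matches are tested with startswith, stopping at the first hit.
import Mathlib
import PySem

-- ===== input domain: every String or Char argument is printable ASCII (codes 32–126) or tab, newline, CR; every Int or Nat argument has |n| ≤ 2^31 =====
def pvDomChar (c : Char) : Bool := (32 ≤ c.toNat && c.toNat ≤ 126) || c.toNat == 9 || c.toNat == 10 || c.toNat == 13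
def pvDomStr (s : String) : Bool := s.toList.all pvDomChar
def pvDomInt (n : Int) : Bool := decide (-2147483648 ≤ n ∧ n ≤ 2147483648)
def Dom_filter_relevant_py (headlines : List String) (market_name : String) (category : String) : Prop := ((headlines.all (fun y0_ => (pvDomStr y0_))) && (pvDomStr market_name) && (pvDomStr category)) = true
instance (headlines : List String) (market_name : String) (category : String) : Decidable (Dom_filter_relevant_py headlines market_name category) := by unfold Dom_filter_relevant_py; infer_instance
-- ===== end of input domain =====

-- B replaces A's per-keyword substring loop (and its keyword set) by a first-character
-- index of the long keywords plus a position-major startswith scan — alternative algorithm, same return value.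

-- ===== PORT A =====
def pvCategoryKeywords : PySem.Dict String (List String) :=
  PySem.Dict.ofList [
    ("crypto", ["crypto", "bitcoin", "btc", "ethereum", "eth", "defi", "solana", "coin"]),
    ("politics", ["election", "vote", "congress", "senate", "policy", "law", "government", "party"]),
    ("sports", ["game", "team", "player", "match", "win", "cup", "league", "finals"]),
    ("business", ["market", "stock", "economy", "gdp", "fed", "rate", "inflation", "corp"]),
    ("science", ["study", "research", "discovery", "health", "space", "science", "tech"])]

def filter_relevant_py (headlines : List String) (market_name : String) (category : String) : List String :=
  let keywords := PySem.Set.ofList (pvCategoryKeywords.getD category [])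
  let market_words := PySem.Set.ofList (PySem.Str.split₀ market_name)
  let keywords := PySem.Set.update keywords market_words
  -- set comprehension {w for w in keywords if len(w) > 3}: filter on the set's elements
  let keywords := keywords.filter (fun w => 3 < PySem.Str.len w)
  headlines.foldl (fun relevant text =>
    let text_lower := PySem.Str.lower text
    if keywords.any (fun kw => PySem.Str.isIn kw text_lower) then relevant ++ [text_lower]
    else relevant) []

-- ===== PORT B =====
-- 'if len(kw) > 3: by_first.setdefault(kw[0], []).append(kw)'; the [] match arm is unreachable (len > 3)
def pvByFirstStep (d : PySem.Dict Char (List String)) (kw : String) : PySem.Dict Char (List String) :=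
  if 3 < PySem.Str.len kw then
    match kw.toList with
    | [] => d
    | c :: _ => d.modify c [] (· ++ [kw])
  else d

-- hit(t): for i in range(len(t)): test startswith at i for the candidates indexed by t[i];
-- ported as structural recursion over the suffix of t starting at i
def pvScan (byFirst : PySem.Dict Char (List String)) : List Char → Bool
  | [] => false
  | c :: rest =>
    if (byFirst.getD c []).any (fun kw => kw.toList.isPrefixOf (c :: rest)) then true
    else pvScan byFirst rest

def filter_relevant_py_alt (headlines : List String) (market_name : String) (category : String) : List String :=
  let byFirst := (pvCategoryKeywords.getD category [] ++ PySem.Str.split₀ market_name).foldl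
    pvByFirstStep PySem.Dict.empty
  (headlines.map PySem.Str.lower).filter (fun t => pvScan byFirst t.toList)

-- ===== PRECONDITION & SPEC =====
def Spec_filter_relevant_py (headlines : List String) (market_name : String) (category : String) (out : List String) : Prop := out = filter_relevant_py_alt headlines market_name category
instance (headlines : List String) (market_name : String) (category : String) (out : List String) : Decidable (Spec_filter_relevant_py headlines market_name category out) := by unfold Spec_filter_relevant_py; infer_instance

-- ===== CLAIM =====
def Claim_equal_filter_relevant_py : Prop := ∀ (headlines : List String) (market_name : String) (category : String), Dom_filter_relevant_py headlines market_name category → Spec_filter_relevant_py headlines market_name category (filter_relevant_py headlines market_name category)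

-- ===== LEMMAS AND PROOFS =====

-- a keyword with more than 3 characters is non-empty
theorem pv_toList_ne_nil {kw : String} (h : 3 < PySem.Str.len kw) : kw.toList ≠ [] := by
  intro hnil
  rw [PySem.Str.len_eq] at h
  simp [hnil] at h

-- the by_first table, looked up at c, holds exactly the long keywords whose first character is c
theorem pv_byFirst_getD (l : List String) (d : PySem.Dict Char (List String)) (c : Char) :
    (l.foldl pvByFirstStep d).getD c [] =
      d.getD c [] ++ l.filter (fun kw => decide (3 < PySem.Str.len kw) && (kw.toList.head? == some c)) := by
  induction l generalizing d with
  | nil => simp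
  | cons kw rest ih =>
    simp only [List.foldl_cons, List.filter_cons]
    rw [ih]
    unfold pvByFirstStep
    by_cases hlen : 3 < PySem.Str.len kw
    · cases hk : kw.toList with
      | nil => exact absurd hk (pv_toList_ne_nil hlen)
      | cons c' tl =>
        simp only [hlen, if_pos]
        rw [PySem.Dict.getD_modify]
        by_cases hc : c = c'
        · simp [hc, List.append_assoc]
        · simp [hc, Ne.symm hc]
    · rw [if_neg hlen]
      simp
      intro h'
      exact absurd (show 3 < PySem.Str.len kw by simpa using h') hlen

-- the position-major scan over t finds a hit iff some long keyword occurs at some position of t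
theorem pv_scan_iff (l : List String) (t : List Char) :
    pvScan (l.foldl pvByFirstStep PySem.Dict.empty) t = true ↔
      ∃ kw ∈ l, 3 < PySem.Str.len kw ∧ ∃ i, kw.toList <+: t.drop i := by
  induction t with
  | nil =>
    simp only [pvScan]
    constructor
    · intro hfalse; cases hfalse
    · rintro ⟨kw, hmem, hlen, i, hpre⟩
      exact absurd (List.prefix_nil.mp (by simpa using hpre)) (pv_toList_ne_nil hlen)
  | cons c rest ih =>
    simp only [pvScan]
    rw [pv_byFirst_getD]
    simp only [PySem.Dict.getD_empty, List.nil_append]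
    constructor
    · intro hsc
      split_ifs at hsc with hany
      · obtain ⟨kw, hmem, hpre⟩ := List.any_eq_true.mp hany
        obtain ⟨hmeml, hcond⟩ := List.mem_filter.mp hmem
        have hlen : 3 < PySem.Str.len kw := by
          have := (Bool.and_eq_true _ _).mp hcond |>.1
          simpa using this
        exact ⟨kw, hmeml, hlen, 0, by simpa using List.isPrefixOf_iff_prefix.mp hpre⟩
      · obtain ⟨kw, hmem, hlen, i, hpre⟩ := ih.mp hsc
        exact ⟨kw, hmem, hlen, i + 1, by simpa using hpre⟩
    · rintro ⟨kw, hmem, hlen, i, hpre⟩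
      cases i with
      | zero =>
        cases hk : kw.toList with
        | nil => exact absurd hk (pv_toList_ne_nil hlen)
        | cons k0 ktl =>
          rw [hk] at hpre
          simp only [List.drop_zero] at hpre
          obtain ⟨hk0, _⟩ := List.cons_prefix_cons.mp hpre
          have hany : (l.filter (fun kw => decide (3 < PySem.Str.len kw) && (kw.toList.head? == some c))).any
              (fun kw => kw.toList.isPrefixOf (c :: rest)) = true := by
            refine List.any_eq_true.mpr ⟨kw, List.mem_filter.mpr ⟨hmem, by
              simp [hk, hk0]
              simpa [hk] using hlen⟩, ?_⟩
            exact List.isPrefixOf_iff_prefix.mpr (by rw [hk]; exact hpre)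
          rw [hany]
          simp
      | succ j =>
        have : pvScan (l.foldl pvByFirstStep PySem.Dict.empty) rest = true :=
          ih.mpr ⟨kw, hmem, hlen, j, by simpa using hpre⟩
        split_ifs <;> simp [this]

-- per headline: A's any-keyword substring test over its keyword set equals B's indexed scan
theorem pv_pred_eq (a b : List String) (t : String) :
    (((PySem.Set.ofList a).update (PySem.Set.ofList b)).filter
        (fun w => 3 < PySem.Str.len w)).any (fun kw => PySem.Str.isIn kw t) =
      pvScan ((a ++ b).foldl pvByFirstStep PySem.Dict.empty) t.toList := by
  rw [Bool.eq_iff_iff, pv_scan_iff]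
  simp only [List.any_eq_true, List.mem_filter, PySem.Set.mem_update, PySem.Set.mem_ofList,
    List.mem_append, decide_eq_true_eq]
  constructor
  · rintro ⟨kw, ⟨hmem, hlen⟩, hin⟩
    obtain ⟨j, hj⟩ := (PySem.Chars.exists_prefix_drop_iff_isIn kw.toList t.toList).mpr
      (by simpa using hin)
    exact ⟨kw, hmem, hlen, j, hj⟩
  · rintro ⟨kw, hmem, hlen, i, hpre⟩
    refine ⟨kw, ⟨hmem, hlen⟩, ?_⟩
    have := (PySem.Chars.exists_prefix_drop_iff_isIn kw.toList t.toList).mp ⟨i, hpre⟩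
    simpa using this

-- ===== VERDICT =====
theorem filter_relevant_py_spec : Claim_equal_filter_relevant_py := by
  intro headlines market_name category _
  unfold Spec_filter_relevant_py filter_relevant_py filter_relevant_py_alt
  simp only []
  rw [PySem.List.foldl_append_if
    (p := fun text => (((PySem.Set.ofList (pvCategoryKeywords.getD category [])).update
        (PySem.Set.ofList (PySem.Str.split₀ market_name))).filter
        (fun w => 3 < PySem.Str.len w)).any (fun kw => PySem.Str.isIn kw (PySem.Str.lower text)))
    (f := PySem.Str.lower)]
  rw [List.filter_map]
  simp only [List.nil_append]
  congr 1
  apply List.filter_congr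
  intro t _
  simp only [Function.comp]
  exact pv_pred_eq _ _ (PySem.Str.lower t)
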